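-- pv_equiv track=rewrite | github.com/sotarules/zpnet-suite | tests/time_test_analyzer.py | find_clusters
-- ===== SOURCE A (Python) =====
-- from collections import Counter
-- from typing import Any, Dict, List, Optional, Tuple
--
-- def find_clusters(
--     values: List[int],
--     min_count: int = 3,
-- ) -> List[Tuple[int, int]]:
--     counter = Counter(values)
--     clusters = [
--         (val, cnt)
--         for val, cnt in counter.items()
--         if cnt >= min_count
--     ]
--     clusters.sort(key=lambda x: x[0])
--     return clusters
-- ===== SOURCE B (Python) =====
-- def find_clusters(values, min_count=3):
--     svals = sorted(values)
--     if not svals: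
--         return []
--     result = []
--     prev = svals[0]
--     cnt = 1
--     for v in svals[1:]:
--         if v == prev:
--             cnt += 1
--         else:
--             if cnt >= min_count:
--                 result.append((prev, cnt))
--             prev = v
--             cnt = 1
--     if cnt >= min_count:
--         result.append((prev, cnt))
--     return result
-- ===== Notes on version B (the rewrite author's own statement) =====
-- stated objective: alternative
-- what changed: Replaces the Counter-then-filter-then-sort pipeline with a single run-length scan over a sorted copy of the input, emitting each group whose length meets the threshold; no dictionary and no final sort are needed.
import Mathlib
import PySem

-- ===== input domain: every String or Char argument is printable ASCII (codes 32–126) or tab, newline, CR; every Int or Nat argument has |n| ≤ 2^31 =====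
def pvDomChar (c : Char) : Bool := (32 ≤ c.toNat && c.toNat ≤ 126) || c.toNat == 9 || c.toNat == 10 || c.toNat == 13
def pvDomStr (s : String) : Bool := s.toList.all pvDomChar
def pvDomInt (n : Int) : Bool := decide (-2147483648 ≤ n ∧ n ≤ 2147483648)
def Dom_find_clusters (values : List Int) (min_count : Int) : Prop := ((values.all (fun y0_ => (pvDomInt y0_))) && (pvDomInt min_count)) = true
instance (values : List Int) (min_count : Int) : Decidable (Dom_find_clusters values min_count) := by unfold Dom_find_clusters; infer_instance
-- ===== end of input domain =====

-- B replaces Counter+filter+sort by a single run-length scan over a sorted copy (alternative decomposition, same asymptotic cost).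


-- ===== PORT A =====
def find_clusters (values : List Int) (min_count : Int) : List (Int × Int) :=
  let counter := PySem.Dict.counter values
  let clusters := counter.items.filter (fun p => decide (min_count ≤ p.2))
  PySem.List.sorted clusters (fun x => x.1) false

-- ===== PORT B =====
-- the scan loop of Source B: current value `prev`, running count `cnt`; emits a group when the value changes
def fcAltGo (min_count : Int) : List Int → Int → Int → List (Int × Int)
  | [], prev, cnt => if min_count ≤ cnt then [(prev, cnt)] else []
  | v :: rest, prev, cnt =>
    if v = prev then fcAltGo min_count rest prev (cnt + 1)
    else (if min_count ≤ cnt then [(prev, cnt)] else []) ++ fcAltGo min_count rest v 1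

def find_clusters_alt (values : List Int) (min_count : Int) : List (Int × Int) :=
  match PySem.List.sorted values (fun x => x) false with
  | [] => []
  | v :: rest => fcAltGo min_count rest v 1

-- ===== PRECONDITION & SPEC =====
def Spec_find_clusters (values : List Int) (min_count : Int) (out : List (Int × Int)) : Prop := out = find_clusters_alt values min_count
instance (values : List Int) (min_count : Int) (out : List (Int × Int)) : Decidable (Spec_find_clusters values min_count out) := by unfold Spec_find_clusters; infer_instance

-- ===== CLAIM (what is proved, stated in full; the proofs are below) =====
def Claim_equal_find_clusters : Prop := ∀ (values : List Int) (min_count : Int), Dom_find_clusters values min_count → Spec_find_clusters values min_count (find_clusters values min_count)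

-- ===== LEMMAS AND PROOFS =====

-- unfolding equations for the scan loop
theorem fcAltGo_nil (mc v c : Int) :
    fcAltGo mc [] v c = if mc ≤ c then [(v, c)] else [] := rfl

theorem fcAltGo_cons_self (mc v c : Int) (rest : List Int) :
    fcAltGo mc (v :: rest) v c = fcAltGo mc rest v (c + 1) := by
  simp [fcAltGo]

theorem fcAltGo_cons_ne (mc v c x : Int) (rest : List Int) (h : x ≠ v) :
    fcAltGo mc (x :: rest) v c =
      (if mc ≤ c then [(v, c)] else []) ++ fcAltGo mc rest x 1 := by
  simp [fcAltGo, h]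

-- membership characterisation of the scan loop on a sorted tail
theorem mem_fcAltGo (mc : Int) :
    ∀ (rest : List Int) (v c : Int), rest.Pairwise (· ≤ ·) → (∀ x ∈ rest, v ≤ x) →
    ∀ p : Int × Int, p ∈ fcAltGo mc rest v c ↔
      mc ≤ p.2 ∧ (p = (v, c + (rest.count v : Int)) ∨
        (p.1 ∈ rest ∧ p.1 ≠ v ∧ p.2 = (rest.count p.1 : Int))) := by
  intro rest
  induction rest with
  | nil =>
    intro v c _ _ p
    rw [fcAltGo_nil]
    split_ifs with h
    · simp only [List.mem_singleton, List.count_nil, List.not_mem_nil, false_and, or_false]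
      constructor
      · rintro rfl; exact ⟨by simpa using h, by simp⟩
      · rintro ⟨_, h2⟩; simpa using h2
    · simp only [List.not_mem_nil, false_iff, List.count_nil, List.not_mem_nil, false_and, or_false]
      rintro ⟨h1, rfl⟩
      exact h (by simpa using h1)
  | cons x rest2 ih =>
    intro v c hpw hlb p
    have hpw2 : rest2.Pairwise (· ≤ ·) := hpw.of_cons
    have hxlb : ∀ y ∈ rest2, x ≤ y := fun y hy => List.rel_of_pairwise_cons hpw hy
    by_cases hxv : x = v
    · subst hxv
      rw [fcAltGo_cons_self, ih x (c + 1) hpw2 hxlb]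
      constructor
      · rintro ⟨h1, h2 | ⟨h3, h4, h5⟩⟩
        · refine ⟨h1, Or.inl ?_⟩
          rw [h2, List.count_cons_self]
          refine Prod.ext rfl ?_
          push_cast; ring
        · refine ⟨h1, Or.inr ⟨List.mem_cons_of_mem _ h3, h4, ?_⟩⟩
          rw [List.count_cons_of_ne (fun h => h4 h.symm), h5]
      · rintro ⟨h1, h2 | ⟨h3, h4, h5⟩⟩
        · refine ⟨h1, Or.inl ?_⟩
          rw [List.count_cons_self] at h2
          rw [h2]
          refine Prod.ext rfl ?_
          push_cast; ring
        · rcases List.mem_cons.mp h3 with h | h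
          · exact absurd h h4
          · refine ⟨h1, Or.inr ⟨h, h4, ?_⟩⟩
            rw [List.count_cons_of_ne (fun hh => h4 hh.symm)] at h5; exact h5
    · have hvx : v < x := lt_of_le_of_ne (hlb x List.mem_cons_self) (fun h => hxv h.symm)
      have hv_not2 : ∀ y ∈ rest2, v < y := fun y hy => lt_of_lt_of_le hvx (hxlb y hy)
      have hcv2 : rest2.count v = 0 :=
        List.count_eq_zero.mpr (fun h => lt_irrefl v (hv_not2 v h))
      have hcvx : (x :: rest2).count v = 0 := by
        rw [List.count_cons_of_ne hxv, hcv2]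
      rw [fcAltGo_cons_ne mc v c x rest2 hxv]
      rw [List.mem_append, ih x 1 hpw2 hxlb]
      constructor
      · rintro (h | ⟨h1, h2 | ⟨h3, h4, h5⟩⟩)
        · split_ifs at h with hc
          · rcases List.mem_singleton.mp h with rfl
            refine ⟨hc, Or.inl ?_⟩
            rw [hcvx]; simp
          · exact absurd h List.not_mem_nil
        · refine ⟨h1, Or.inr ⟨?_, ?_, ?_⟩⟩
          · rw [h2]; exact List.mem_cons_self
          · rw [h2]; exact fun h => hxv h
          · rw [h2]; simp only [List.count_cons_self]; push_cast; ring
        · have hne : x ≠ p.1 := fun hh => h4 hh.symm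
          refine ⟨h1, Or.inr ⟨List.mem_cons_of_mem _ h3, ?_, ?_⟩⟩
          · intro hh; exact lt_irrefl v (hh ▸ hv_not2 p.1 h3)
          · rw [List.count_cons_of_ne hne, h5]
      · rintro ⟨h1, h2 | ⟨h3, h4, h5⟩⟩
        · left
          rw [hcvx] at h2
          simp only [Nat.cast_zero, add_zero] at h2
          rw [if_pos (show mc ≤ c by rw [h2] at h1; simpa using h1)]
          simp [h2]
        · by_cases hpx : p.1 = x
          · right
            refine ⟨h1, Or.inl ?_⟩
            refine Prod.ext (by simpa using hpx) ?_
            rw [h5, hpx]; simp only [List.count_cons_self]; push_cast; ring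
          · right
            have h : p.1 ∈ rest2 := (List.mem_cons.mp h3).resolve_left hpx
            have hne : x ≠ p.1 := fun hh => hpx hh.symm
            refine ⟨h1, Or.inr ⟨h, fun hh => hne hh.symm, ?_⟩⟩
            rw [List.count_cons_of_ne hne] at h5; exact h5

-- the scan output has strictly increasing first components (with v as a lower bound)
theorem pairwise_fcAltGo (mc : Int) :
    ∀ (rest : List Int) (v c : Int), rest.Pairwise (· ≤ ·) → (∀ x ∈ rest, v ≤ x) →
    (fcAltGo mc rest v c).Pairwise (fun a b => a.1 < b.1) ∧
      ∀ p ∈ fcAltGo mc rest v c, v ≤ p.1 := by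
  intro rest
  induction rest with
  | nil =>
    intro v c _ _
    rw [fcAltGo_nil]
    constructor
    · split_ifs <;> simp
    · intro p hp
      split_ifs at hp
      · rcases List.mem_singleton.mp hp with rfl; exact le_refl _
      · exact absurd hp List.not_mem_nil
  | cons x rest2 ih =>
    intro v c hpw hlb
    have hpw2 : rest2.Pairwise (· ≤ ·) := hpw.of_cons
    have hxlb : ∀ y ∈ rest2, x ≤ y := fun y hy => List.rel_of_pairwise_cons hpw hy
    by_cases hxv : x = v
    · subst hxv
      rw [fcAltGo_cons_self]
      exact ih x (c + 1) hpw2 hxlb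
    · have hvx : v < x := lt_of_le_of_ne (hlb x List.mem_cons_self) (fun h => hxv h.symm)
      obtain ⟨hpw', hlb'⟩ := ih x 1 hpw2 hxlb
      rw [fcAltGo_cons_ne mc v c x rest2 hxv]
      constructor
      · split_ifs with hc
        · refine List.pairwise_cons.mpr ⟨?_, hpw'⟩
          intro p hp
          exact lt_of_lt_of_le hvx (hlb' p hp)
        · simpa using hpw'
      · intro p hp
        rcases List.mem_append.mp hp with h | h
        · split_ifs at h with hc
          · rcases List.mem_singleton.mp h with rfl; exact le_refl _
          · exact absurd h List.not_mem_nil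
        · exact le_of_lt (lt_of_lt_of_le hvx (hlb' p h))

theorem find_clusters_eq (values : List Int) (min_count : Int) :
    find_clusters values min_count = find_clusters_alt values min_count := by
  unfold find_clusters find_clusters_alt
  simp only [PySem.Dict.items_counter]
  rcases hs : PySem.List.sorted values (fun x => x) false with _ | ⟨v, rest⟩
  · have hv : values = [] := (PySem.List.sorted_eq_nil_iff values (fun x => x) false).mp hs
    subst hv
    rw [show PySem.Set.ofList ([] : List Int) = [] from rfl]
    simp only [List.map_nil, List.filter_nil]
    exact (PySem.List.sorted_eq_nil_iff [] (fun x : Int × Int => x.1) false).mpr rfl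
  · have hperm : (v :: rest).Perm values := hs ▸ PySem.List.sorted_perm values (fun x => x) false
    have hpws : (v :: rest).Pairwise (· ≤ ·) := by
      have := PySem.List.sorted_pairwise values (fun x => x)
      rw [hs] at this; exact this
    have hpw2 : rest.Pairwise (· ≤ ·) := hpws.of_cons
    have hlb : ∀ x ∈ rest, v ≤ x := fun y hy => List.rel_of_pairwise_cons hpws hy
    obtain ⟨hyspw, -⟩ := pairwise_fcAltGo min_count rest v 1 hpw2 hlb
    have hcount : ∀ k : Int, values.count k = (v :: rest).count k :=
      fun k => (hperm.count_eq k).symm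
    have hysnd : (fcAltGo min_count rest v 1).Nodup :=
      List.Pairwise.imp (fun h => by intro he; rw [he] at h; exact lt_irrefl _ h) hyspw
    have hinj : Function.Injective (fun k : Int => (k, (values.count k : Int))) := by
      intro a b h; exact ((Prod.mk.injEq _ _ _ _).mp h).1
    have hxsnd : (((PySem.Set.ofList values).map (fun k => (k, (values.count k : Int)))).filter
        (fun p => decide (min_count ≤ p.2))).Nodup :=
      ((PySem.Set.nodup_ofList values).map hinj).filter _
    have hmem : ∀ p : Int × Int, p ∈ fcAltGo min_count rest v 1 ↔
        p ∈ ((PySem.Set.ofList values).map (fun k => (k, (values.count k : Int)))).filter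
          (fun p => decide (min_count ≤ p.2)) := by
      intro p
      rw [mem_fcAltGo min_count rest v 1 hpw2 hlb p]
      simp only [List.mem_filter, List.mem_map, PySem.Set.mem_ofList, decide_eq_true_eq]
      constructor
      · rintro ⟨h1, h2 | ⟨h3, h4, h5⟩⟩
        · refine ⟨⟨v, hperm.mem_iff.mp List.mem_cons_self, ?_⟩, h2 ▸ h1⟩
          rw [h2]
          refine Prod.ext rfl ?_
          rw [hcount v, List.count_cons_self]; push_cast; ring
        · refine ⟨⟨p.1, hperm.mem_iff.mp (List.mem_cons_of_mem _ h3), ?_⟩, h1⟩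
          refine Prod.ext rfl ?_
          rw [hcount p.1, List.count_cons_of_ne (fun hh => h4 hh.symm), ← h5]
      · rintro ⟨⟨k, hk, he⟩, h2⟩
        rcases he with rfl
        simp only at h2 ⊢
        refine ⟨h2, ?_⟩
        have hkmem : k ∈ v :: rest := hperm.mem_iff.mpr hk
        by_cases hkv : k = v
        · subst hkv
          left
          refine Prod.ext rfl ?_
          rw [hcount k, List.count_cons_self]; push_cast; ring
        · right
          refine ⟨(List.mem_cons.mp hkmem).resolve_left hkv, hkv, ?_⟩
          rw [hcount k, List.count_cons_of_ne (fun hh => hkv hh.symm)]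
    have hp : (fcAltGo min_count rest v 1).Perm
        (((PySem.Set.ofList values).map (fun k => (k, (values.count k : Int)))).filter
          (fun p => decide (min_count ≤ p.2))) :=
      (List.perm_ext_iff_of_nodup hysnd hxsnd).mpr hmem
    exact PySem.List.sorted_eq_of_perm_of_pairwise_lt _ _ _ hp hyspw

-- ===== VERDICT (by name: the statement is the Claim_ definition above) =====
theorem find_clusters_spec : Claim_equal_find_clusters := by
  intro values min_count _
  unfold Spec_find_clusters
  exact find_clusters_eq values min_count
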